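-- pv_equiv track=rewrite | github.com/pushpa-info-14/python-programming | LeetCode/750-1000/Q757 Set Intersection Size At Least Two.py | intersectionSizeTwo2
-- ===== SOURCE A (Python) =====
-- from typing import List
--
-- def intersectionSizeTwo2(intervals: List[List[int]]) -> int:
--     intervals.sort(key=lambda i: (i[1], i[0]))
--     p1, p2 = -1, -1
--     res = 0
--     for left, right in intervals:
--         if p2 < left:
--             res += 2
--             p1, p2 = right - 1, right
--         elif p1 < left:
--             res += 1
--             if p2 == right:
--                 p1 = right - 1
--             else:
--                 p1, p2 = p2, right
--     return res
-- ===== SOURCE B (Python) =====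
-- def intersectionSizeTwo2(intervals):
--     chosen = set()   # every point picked so far
--     res = 0
--     for left, right in sorted(intervals, key=lambda iv: (iv[1], iv[0])):
--         c = sum(1 for p in chosen if left <= p <= right)
--         if c >= 2:
--             continue
--         res += 2 - c
--         if c == 1:
--             chosen.add(right - 1 if right in chosen else right)
--         else:
--             chosen.update((right - 1, right))
--     return res
-- ===== Notes on version B (the rewrite author's own statement) =====
-- stated objective: alternative
-- what changed: B replaces A's two-scalar pointer state (p1,p2) by the full set of chosen points: each interval is classified by counting how many chosen points lie inside it, and the point to add is chosen by membership in the set, not by pointer reassignment; B also sorts a copy instead of mutating the argument. Pre_ restricts to the task's natural domain (rows are pairs [l,r] with 0 <= l, LeetCode's 0 <= a_i < b_i except that degenerate l >= r stays inside and is proved equal): non-pair rows make A raise, and on negative left endpoints A's -1 sentinel silently skips intervals.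
-- outside the precondition, e.g. on intersectionSizeTwo2([[-5, -3]]): A returns 0, B returns 2; on intersectionSizeTwo2([[4, 5], [-2, -1], [2, -1]]): A returns 4, B returns 6
import Mathlib
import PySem

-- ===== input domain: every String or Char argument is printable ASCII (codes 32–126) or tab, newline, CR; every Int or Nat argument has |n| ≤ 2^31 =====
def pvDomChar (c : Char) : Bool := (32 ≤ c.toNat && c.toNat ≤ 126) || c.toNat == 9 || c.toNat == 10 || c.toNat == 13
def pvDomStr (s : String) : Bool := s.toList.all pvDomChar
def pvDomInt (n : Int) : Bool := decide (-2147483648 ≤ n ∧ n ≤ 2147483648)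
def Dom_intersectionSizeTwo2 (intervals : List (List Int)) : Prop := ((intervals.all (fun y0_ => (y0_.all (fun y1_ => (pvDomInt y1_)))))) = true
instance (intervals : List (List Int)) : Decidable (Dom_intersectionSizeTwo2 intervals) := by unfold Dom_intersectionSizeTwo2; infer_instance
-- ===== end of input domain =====

-- B tracks the full set of chosen points and classifies each interval by counting chosen points
-- inside it, instead of A's two pointers p1,p2 ('alternative' objective, not faster).
-- Note: Python A sorts `intervals` in place; the equivalence proved here is about the return value
-- only (B sorts a copy and does not mutate its argument).

-- ===== PORT A =====
-- key=lambda i: (i[1], i[0])  (i[1]/i[0] raise IndexError on short lists; Pre_ excludes those,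
-- so the pyGetD default 0 is never consulted on admitted inputs)
def pvK1 (iv : List Int) : Int := PySem.List.pyGetD iv 1 0
def pvK2 (iv : List Int) : Int := PySem.List.pyGetD iv 0 0

-- one iteration of A's for-loop; state is (p1, p2, res); a row that is not [left, right] would
-- raise on unpacking in Python (excluded by Pre_), the `_` arm is never reached on admitted inputs
def pvStepA (s : Int × Int × Int) (iv : List Int) : Int × Int × Int :=
  match iv with
  | [left, right] =>
    if s.2.1 < left then (right - 1, right, s.2.2 + 2)
    else if s.1 < left then
      if s.2.1 = right then (right - 1, s.2.1, s.2.2 + 1)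
      else (s.2.1, right, s.2.2 + 1)
    else s
  | _ => s

def intersectionSizeTwo2 (intervals : List (List Int)) : Int :=
  ((PySem.List.sorted2 intervals pvK1 pvK2).foldl pvStepA (-1, -1, 0)).2.2

-- ===== PORT B =====
-- one iteration of B's for-loop; state is (chosen, res); the count `c` is a sum over the set,
-- which is order-independent, so iterating the Set's list is exact; the `_` arm mirrors the
-- raising rows Pre_ excludes, exactly as in A's port
def pvStepB (st : PySem.Set Int × Int) (iv : List Int) : PySem.Set Int × Int :=
  match iv with
  | [left, right] =>
    let c : Int := ((st.1.filter (fun p => decide (left ≤ p) && decide (p ≤ right))).length : Int)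
    if 2 ≤ c then st
    else
      let res := st.2 + (2 - c)
      if c = 1 then
        (PySem.Set.add st.1 (if PySem.Set.contains st.1 right then right - 1 else right), res)
      else (PySem.Set.update st.1 [right - 1, right], res)
  | _ => st

def intersectionSizeTwo2_alt (intervals : List (List Int)) : Int :=
  ((PySem.List.sorted2 intervals pvK1 pvK2).foldl pvStepB (PySem.Set.empty, 0)).2

-- ===== PRECONDITION & SPEC =====
-- Pre_ is the task's natural domain (LeetCode 757: 0 ≤ aᵢ): every row is a pair [l, r] with
-- 0 ≤ l.  Non-pair rows make Python A raise (IndexError/ValueError).  Rows with l < 0 are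
-- outside the task's domain; there A's -1 sentinel silently skips intervals (A([[-5,-3]]) = 0)
-- while B counts them, so Pre_ excludes them and says so (degenerate l ≥ r stays inside).
def Pre_intersectionSizeTwo2 (intervals : List (List Int)) : Prop :=
  (intervals.all (fun iv =>
    match iv with
    | [l, _] => decide (0 ≤ l)
    | _ => false)) = true
instance (intervals : List (List Int)) : Decidable (Pre_intersectionSizeTwo2 intervals) := by
  unfold Pre_intersectionSizeTwo2; infer_instance

def pvWitness_intersectionSizeTwo2 : List (List Int) := [[0, 3], [1, 4], [2, 5]]

def Spec_intersectionSizeTwo2 (intervals : List (List Int)) (out : Int) : Prop := out = intersectionSizeTwo2_alt intervals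
instance (intervals : List (List Int)) (out : Int) : Decidable (Spec_intersectionSizeTwo2 intervals out) := by unfold Spec_intersectionSizeTwo2; infer_instance

-- ===== CLAIM (what is proved, stated in full; the proofs are below) =====
def Claim_equal_intersectionSizeTwo2 : Prop := ∀ (intervals : List (List Int)), Dom_intersectionSizeTwo2 intervals → Pre_intersectionSizeTwo2 intervals → Spec_intersectionSizeTwo2 intervals (intersectionSizeTwo2 intervals)

-- ===== LEMMAS AND PROOFS =====

@[simp] lemma pvK1_pair (l r : Int) : pvK1 [l, r] = r := by
  simp [pvK1, PySem.List.pyGetD, PySem.List.pyGet?, PySem.List.pyIdx?]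

-- a row admitted by Pre_ is a 2-element list with nonnegative left endpoint
def pvValid (iv : List Int) : Prop := ∃ l r : Int, iv = [l, r] ∧ 0 ≤ l

lemma pvPre_valid {intervals : List (List Int)} (h : Pre_intersectionSizeTwo2 intervals) :
    ∀ iv ∈ intervals, pvValid iv := by
  intro iv hm
  have h2 := List.all_eq_true.mp h iv hm
  rcases iv with _ | ⟨a, _ | ⟨b, _ | ⟨c, t⟩⟩⟩ <;> simp at h2
  exact ⟨a, b, rfl, h2⟩

-- the comparison sorted2 inserts with (Python's lexicographic tuple <)
def pvBefore (a b : List Int) : Bool :=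
  decide (pvK1 a < pvK1 b) || (!decide (pvK1 b < pvK1 a) && decide (pvK2 a < pvK2 b))

lemma pvSorted2_eq (xs : List (List Int)) :
    PySem.List.sorted2 xs pvK1 pvK2 =
      xs.foldl (fun acc x => PySem.List.insertBy pvBefore x acc) [] := by
  simp only [PySem.List.sorted2]
  rfl

lemma pvInsert_pairwise (x : List Int) (ys : List (List Int))
    (h : ys.Pairwise (fun a b => pvK1 a ≤ pvK1 b)) :
    (PySem.List.insertBy pvBefore x ys).Pairwise (fun a b => pvK1 a ≤ pvK1 b) := by
  induction ys with
  | nil => simp [PySem.List.insertBy]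
  | cons y t ih =>
    rw [List.pairwise_cons] at h
    obtain ⟨hy, ht⟩ := h
    by_cases hb : pvBefore x y = true
    · have hxy : pvK1 x ≤ pvK1 y := by
        simp [pvBefore] at hb; omega
      simp only [PySem.List.insertBy, hb, if_true]
      refine List.Pairwise.cons ?_ (List.Pairwise.cons hy ht)
      intro z hz
      rcases List.mem_cons.mp hz with rfl | hz'
      · exact hxy
      · exact le_trans hxy (hy z hz')
    · have hyx : pvK1 y ≤ pvK1 x := by
        simp [pvBefore] at hb; omega
      simp only [PySem.List.insertBy, hb, if_false, Bool.false_eq_true]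
      refine List.Pairwise.cons ?_ (ih ht)
      intro z hz
      rcases (PySem.List.insertBy_mem_iff pvBefore x z t).mp hz with rfl | hz'
      · exact hyx
      · exact hy z hz'

lemma pvSorted2_pairwise (xs : List (List Int)) :
    (PySem.List.sorted2 xs pvK1 pvK2).Pairwise (fun a b => pvK1 a ≤ pvK1 b) := by
  rw [pvSorted2_eq]
  suffices h : ∀ acc : List (List Int), acc.Pairwise (fun a b => pvK1 a ≤ pvK1 b) →
      (xs.foldl (fun acc x => PySem.List.insertBy pvBefore x acc) acc).Pairwise
        (fun a b => pvK1 a ≤ pvK1 b) from h [] (by simp)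
  induction xs with
  | nil => intro acc hacc; simpa using hacc
  | cons x t ih =>
    intro acc hacc
    simpa using ih _ (pvInsert_pairwise x acc hacc)

-- coupling invariant: A's (p1, p2) are the two largest (distinct) elements of B's chosen set,
-- or both are the initial -1 sentinel while the set is still empty
def pvInv (p1 p2 : Int) (s : List Int) : Prop :=
  (s = [] ∧ p1 = -1 ∧ p2 = -1) ∨
  (p1 ∈ s ∧ p2 ∈ s ∧ p1 < p2 ∧ ∀ x ∈ s, x ≤ p2 ∧ (x = p2 ∨ x ≤ p1))

-- a Nodup list with two distinct members has length ≥ 2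
lemma pvTwo_le_length {s : List Int} (hnd : s.Nodup) {a b : Int}
    (ha : a ∈ s) (hb : b ∈ s) (hab : a ≠ b) : 2 ≤ s.length := by
  rcases s with _ | ⟨x, _ | ⟨y, t⟩⟩
  · simp at ha
  · simp at ha hb; omega
  · simp

-- a Nodup list whose members all equal a, with a a member, is [a]
lemma pvSingleton_of_all_eq {s : List Int} (hnd : s.Nodup) {a : Int}
    (ha : a ∈ s) (hall : ∀ x ∈ s, x = a) : s = [a] := by
  rcases s with _ | ⟨x, t⟩
  · simp at ha
  · have hx : x = a := hall x (by simp)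
    subst hx
    have ht : t = [] := by
      rcases t with _ | ⟨y, t'⟩
      · rfl
      · have hy : y = x := hall y (by simp)
        simp [hy] at hnd
    simp [ht]

-- core loop equivalence: A's res and B's res stay equal; the invariant pvInv couples the states
lemma pvLoop (rs : List (List Int)) :
    ∀ (p1 p2 res : Int) (s : List Int),
      (∀ iv ∈ rs, pvValid iv) →
      rs.Pairwise (fun a b => pvK1 a ≤ pvK1 b) →
      (∀ iv ∈ rs, s ≠ [] → p2 ≤ pvK1 iv) →
      s.Nodup →
      pvInv p1 p2 s →
      (rs.foldl pvStepA (p1, p2, res)).2.2 = (rs.foldl pvStepB (s, res)).2 := by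
  induction rs with
  | nil => intro p1 p2 res s _ _ _ _ _; simp
  | cons iv rest ih =>
    intro p1 p2 res s hval hpw hkey hnd hinv
    obtain ⟨l, r, hiv, hl⟩ := hval iv (by simp)
    subst hiv
    have hval' : ∀ x ∈ rest, pvValid x := fun x h => hval x (List.mem_cons_of_mem _ h)
    rw [List.pairwise_cons] at hpw
    obtain ⟨hhead, hpw'⟩ := hpw
    have hhead' : ∀ x ∈ rest, r ≤ pvK1 x := by
      intro x h; have := hhead x h; simpa using this
    simp only [List.foldl_cons]
    rcases hinv with ⟨hsnil, hp1, hp2⟩ | ⟨hp1, hp2, hlt, hub⟩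
    · -- set still empty, pair is the (-1, -1) sentinel: c = 0, both versions pick r-1 and r
      subst hsnil; subst hp1; subst hp2
      have hstepA : pvStepA (-1, -1, res) [l, r] = (r - 1, r, res + 2) := by
        simp [pvStepA, show (-1 : Int) < l by omega]
      have hadd2 : PySem.Set.add [r - 1] r = [r - 1, r] :=
        PySem.Set.add_of_not_mem (by simp; omega)
      have hstepB : pvStepB (([] : List Int), res) [l, r] = ([r - 1, r], res + 2) := by
        simp [pvStepB, PySem.Set.update_cons, PySem.Set.update_nil, hadd2]
      rw [hstepA, hstepB]
      refine ih (r - 1) r (res + 2) [r - 1, r] hval' hpw' (fun x h _ => hhead' x h) ?_ ?_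
      · simp
      · refine Or.inr ⟨by simp, by simp, by omega, ?_⟩
        intro x hx
        simp at hx
        rcases hx with rfl | rfl
        · exact ⟨by omega, Or.inr (by omega)⟩
        · exact ⟨le_refl _, Or.inl rfl⟩
    · -- set nonempty: (p1, p2) are its two largest distinct elements
      have hne : s ≠ [] := by intro h; subst h; simp at hp1
      have hp2r : p2 ≤ r := by
        have := hkey [l, r] (by simp) hne; simpa using this
      have hrs : r ∈ s ↔ p2 = r := by
        constructor
        · intro h; have := (hub r h).1; omega
        · intro h; exact h ▸ hp2
      by_cases h1 : l ≤ p1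
      · -- both recent picks cover the interval: c ≥ 2, both versions skip
        have hmem1 : p1 ∈ s.filter (fun p => decide (l ≤ p) && decide (p ≤ r)) :=
          List.mem_filter.mpr ⟨hp1, by simp; omega⟩
        have hmem2 : p2 ∈ s.filter (fun p => decide (l ≤ p) && decide (p ≤ r)) :=
          List.mem_filter.mpr ⟨hp2, by simp; omega⟩
        have hc2 : 2 ≤ (s.filter (fun p => decide (l ≤ p) && decide (p ≤ r))).length :=
          pvTwo_le_length (hnd.filter _) hmem1 hmem2 (by omega)
        have hcI : (2 : Int) ≤ ((s.filter (fun p => decide (l ≤ p) && decide (p ≤ r))).length : Int) := by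
          exact_mod_cast hc2
        have hstepA : pvStepA (p1, p2, res) [l, r] = (p1, p2, res) := by
          simp [pvStepA, show ¬ p2 < l by omega, show ¬ p1 < l by omega]
        have hstepB : pvStepB (s, res) [l, r] = (s, res) := by
          simp only [pvStepB]
          rw [if_pos hcI]
        rw [hstepA, hstepB]
        exact ih p1 p2 res s hval' hpw' (fun x h => hkey x (List.mem_cons_of_mem _ h)) hnd
          (Or.inr ⟨hp1, hp2, hlt, hub⟩)
      · by_cases h2 : l ≤ p2
        · -- exactly one chosen point (namely p2) lies in the interval: c = 1
          have hfilt : s.filter (fun p => decide (l ≤ p) && decide (p ≤ r)) = [p2] := by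
            apply pvSingleton_of_all_eq (hnd.filter _)
            · exact List.mem_filter.mpr ⟨hp2, by simp; omega⟩
            · intro x hx
              obtain ⟨hxs, hpx⟩ := List.mem_filter.mp hx
              simp at hpx
              rcases (hub x hxs).2 with h | h
              · exact h
              · omega
          by_cases hpr : p2 = r
          · -- right is already chosen: both pick right - 1
            subst hpr
            have hmemr : p2 ∈ s := hp2
            have hstepA : pvStepA (p1, p2, res) [l, p2] = (p2 - 1, p2, res + 1) := by
              simp [pvStepA, show ¬ p2 < l by omega, show p1 < l by omega]
            have hstepB : pvStepB (s, res) [l, p2] = (PySem.Set.add s (p2 - 1), res + 1) := by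
              simp [pvStepB, hfilt, hmemr, show ¬ (2 : Int) ≤ 1 by omega]
            rw [hstepA, hstepB]
            refine ih (p2 - 1) p2 (res + 1) (PySem.Set.add s (p2 - 1)) hval' hpw'
              (fun x h _ => hhead' x h) (PySem.Set.nodup_add _ _ hnd) ?_
            refine Or.inr ⟨(PySem.Set.mem_add _ _ _).mpr (Or.inr rfl),
              (PySem.Set.mem_add _ _ _).mpr (Or.inl hmemr), by omega, ?_⟩
            intro x hx
            rcases (PySem.Set.mem_add _ _ _).mp hx with hxs | hxe
            · have := (hub x hxs).1; exact ⟨by omega, by omega⟩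
            · subst hxe; exact ⟨by omega, by omega⟩
          · -- right is free: both pick right
            have hp2r' : p2 < r := by omega
            have hstepA : pvStepA (p1, p2, res) [l, r] = (p2, r, res + 1) := by
              simp only [pvStepA]
              rw [if_neg (by omega), if_pos (by omega), if_neg hpr]
            have hrns : r ∉ s := fun h => hpr (hrs.mp h)
            have hstepB : pvStepB (s, res) [l, r] = (PySem.Set.add s r, res + 1) := by
              simp [pvStepB, hfilt, hrns, show ¬ (2 : Int) ≤ 1 by omega]
            rw [hstepA, hstepB]
            refine ih p2 r (res + 1) (PySem.Set.add s r) hval' hpw'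
              (fun x h _ => hhead' x h) (PySem.Set.nodup_add _ _ hnd) ?_
            refine Or.inr ⟨(PySem.Set.mem_add _ _ _).mpr (Or.inl hp2),
              (PySem.Set.mem_add _ _ _).mpr (Or.inr rfl), hp2r', ?_⟩
            intro x hx
            rcases (PySem.Set.mem_add _ _ _).mp hx with hxs | hxe
            · have := (hub x hxs).1; exact ⟨by omega, Or.inr (by omega)⟩
            · subst hxe; exact ⟨le_refl _, Or.inl rfl⟩
        · -- no chosen point reaches left: c = 0, both pick r-1 and r
          have hfilt : s.filter (fun p => decide (l ≤ p) && decide (p ≤ r)) = [] := by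
            rw [List.filter_eq_nil_iff]
            intro x hx
            have := (hub x hx).1
            simp; omega
          have hstepA : pvStepA (p1, p2, res) [l, r] = (r - 1, r, res + 2) := by
            simp [pvStepA, show p2 < l by omega]
          have hstepB : pvStepB (s, res) [l, r] =
              (PySem.Set.add (PySem.Set.add s (r - 1)) r, res + 2) := by
            simp [pvStepB, hfilt, PySem.Set.update_cons, PySem.Set.update_nil]
          rw [hstepA, hstepB]
          refine ih (r - 1) r (res + 2) (PySem.Set.add (PySem.Set.add s (r - 1)) r) hval' hpw'
            (fun x h _ => hhead' x h) (PySem.Set.nodup_add _ _ (PySem.Set.nodup_add _ _ hnd)) ?_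
          refine Or.inr ⟨(PySem.Set.mem_add _ _ _).mpr (Or.inl ((PySem.Set.mem_add _ _ _).mpr (Or.inr rfl))),
            (PySem.Set.mem_add _ _ _).mpr (Or.inr rfl), by omega, ?_⟩
          intro x hx
          rcases (PySem.Set.mem_add _ _ _).mp hx with hx1 | hxe
          · rcases (PySem.Set.mem_add _ _ _).mp hx1 with hxs | hxe1
            · have := (hub x hxs).1; exact ⟨by omega, by omega⟩
            · subst hxe1; exact ⟨by omega, by omega⟩
          · subst hxe; exact ⟨le_refl _, Or.inl rfl⟩

-- ===== VERDICT (by name: the statement is the Claim_ definition above) =====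
theorem intersectionSizeTwo2_spec : Claim_equal_intersectionSizeTwo2 := by
  intro intervals _hDom hPre
  unfold Spec_intersectionSizeTwo2 intersectionSizeTwo2 intersectionSizeTwo2_alt
  have hval : ∀ iv ∈ PySem.List.sorted2 intervals pvK1 pvK2, pvValid iv := by
    intro iv h
    have hm : iv ∈ intervals :=
      ((PySem.List.sorted2_perm intervals pvK1 pvK2 false).mem_iff).mp h
    exact pvPre_valid hPre iv hm
  exact pvLoop _ (-1) (-1) 0 [] hval (pvSorted2_pairwise intervals)
    (fun iv h hne => absurd rfl hne) (by simp) (Or.inl ⟨rfl, rfl, rfl⟩)
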